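-- pv_equiv track=rewrite | github.com/mickvav/adventofcode-2022 | 13/doit2.py | get_decoder_key
-- ===== SOURCE A (Python) =====
-- def get_decoder_key(values):
--     i1 = -1
--     i2 = -1
--     for i,v in enumerate(values):
--         if str(v) == '[[2]]':
--             i1 = i + 1
--         if str(v) == '[[6]]':
--             i2 = i + 1
--     return i1*i2
-- ===== SOURCE B (Python) =====
-- def get_decoder_key(values):
--     def last_pos(marker):
--         # scan from the back: the first match from the end is the last occurrence
--         for j in range(len(values) - 1, -1, -1):
--             if str(values[j]) == marker:
--                 return j + 1
--         return -1
--     return last_pos('[[2]]') * last_pos('[[6]]')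
-- ===== Notes on version B (the rewrite author's own statement) =====
-- stated objective: alternative
-- what changed: Replaced A's single forward pass that threads two marker accumulators through every element by two staged backward searches that each stop at the first match from the end (the last occurrence), eliminating the accumulators entirely.
import Mathlib
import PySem

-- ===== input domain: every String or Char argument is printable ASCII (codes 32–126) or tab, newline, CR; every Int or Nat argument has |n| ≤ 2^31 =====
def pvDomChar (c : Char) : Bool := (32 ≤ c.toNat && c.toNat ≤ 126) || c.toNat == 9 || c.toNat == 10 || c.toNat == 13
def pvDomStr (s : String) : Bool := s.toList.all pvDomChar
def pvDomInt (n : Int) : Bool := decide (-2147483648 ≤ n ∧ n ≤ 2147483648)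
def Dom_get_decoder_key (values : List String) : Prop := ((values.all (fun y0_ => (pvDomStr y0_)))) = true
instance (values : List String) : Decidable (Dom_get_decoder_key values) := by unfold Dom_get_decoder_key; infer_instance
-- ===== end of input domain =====

-- B replaces A's forward pass with two marker accumulators by two staged backward searches
-- that return at the first match from the end; objective: alternative (same cost, no accumulators).


-- ===== PORT A =====
def get_decoder_key (values : List String) : Int :=
  let st := (PySem.List.enumerate values).foldl
    (fun (st : Int × Int) iv =>
      let st := if iv.2 == "[[2]]" then (iv.1 + 1, st.2) else st
      if iv.2 == "[[6]]" then (st.1, iv.1 + 1) else st)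
    (-1, -1)
  st.1 * st.2

-- ===== PORT B =====
-- backward loop `for j in range(len-1,-1,-1)` with early return, as structural recursion
-- over the reversed list carrying the 1-based position n = j+1 of the current head
def pvLastPos (rev : List String) (n : Int) (marker : String) : Int :=
  match rev with
  | [] => -1
  | x :: tl => if x == marker then n else pvLastPos tl (n - 1) marker

def get_decoder_key_alt (values : List String) : Int :=
  (pvLastPos values.reverse values.length "[[2]]") *
  (pvLastPos values.reverse values.length "[[6]]")

-- ===== PRECONDITION & SPEC =====
def Spec_get_decoder_key (values : List String) (out : Int) : Prop := out = get_decoder_key_alt values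
instance (values : List String) (out : Int) : Decidable (Spec_get_decoder_key values out) := by unfold Spec_get_decoder_key; infer_instance

-- ===== CLAIM (what is proved, stated in full; the proofs are below) =====
def Claim_equal_get_decoder_key : Prop := ∀ (values : List String), Dom_get_decoder_key values → Spec_get_decoder_key values (get_decoder_key values)

-- ===== LEMMAS AND PROOFS =====

-- pvLastPos generalized over the not-found default, to express appending at the far end
def pvLPD (rev : List String) (n : Int) (m : String) (d : Int) : Int :=
  match rev with
  | [] => d
  | x :: tl => if x == m then n else pvLPD tl (n - 1) m d

theorem pvLastPos_eq_lpd (rev : List String) (n : Int) (m : String) :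
    pvLastPos rev n m = pvLPD rev n m (-1) := by
  induction rev generalizing n with
  | nil => rfl
  | cons x tl ih => simp [pvLastPos, pvLPD, ih]

theorem pvLPD_append (rev : List String) (x : String) (n : Int) (m : String) (d : Int) :
    pvLPD (rev ++ [x]) n m d = pvLPD rev n m (if x == m then n - rev.length else d) := by
  induction rev generalizing n with
  | nil => simp [pvLPD]
  | cons y tl ih =>
      simp only [List.cons_append, pvLPD, ih, List.length_cons]
      split_ifs <;> first | rfl | (congr 1; push_cast; ring)

-- Invariant: A's accumulator pair after folding the tail (enumerated from i0) equals the
-- two backward searches over that tail's reverse, with the incoming accumulator as default.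
theorem pv_inv (l : List String) : ∀ (i0 a b : Int),
    ((PySem.List.enumerate l i0).foldl
      (fun (st : Int × Int) iv =>
        let st := if iv.2 == "[[2]]" then (iv.1 + 1, st.2) else st
        if iv.2 == "[[6]]" then (st.1, iv.1 + 1) else st) (a, b))
    = (pvLPD l.reverse (i0 + l.length) "[[2]]" a,
       pvLPD l.reverse (i0 + l.length) "[[6]]" b) := by
  induction l with
  | nil => intro i0 a b; simp [PySem.List.enumerate_nil, pvLPD]
  | cons x tl ih =>
      intro i0 a b
      rw [PySem.List.enumerate_cons, List.foldl_cons]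
      simp only [List.reverse_cons, List.length_cons]
      have hstep : (let st := if x == "[[2]]" then ((i0 + 1 : Int), b) else (a, b)
                    if x == "[[6]]" then (st.1, i0 + 1) else st)
          = ((if x == "[[2]]" then i0 + 1 else a), (if x == "[[6]]" then i0 + 1 else b)) := by
        by_cases c2 : x == "[[2]]" <;> by_cases c6 : x == "[[6]]" <;> simp [c2, c6]
      rw [hstep, ih]
      rw [pvLPD_append, pvLPD_append]
      simp only [List.length_reverse]
      push_cast
      ring_nf

-- ===== VERDICT (by name: the statement is the Claim_ definition above) =====
theorem get_decoder_key_spec : Claim_equal_get_decoder_key := by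
  intro values _
  unfold Spec_get_decoder_key get_decoder_key get_decoder_key_alt
  rw [show ((-1 : Int), (-1 : Int)) = (((-1 : Int)), ((-1 : Int))) from rfl]
  rw [pv_inv values 0 (-1) (-1)]
  simp [pvLastPos_eq_lpd]
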